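-- pv_equiv track=rewrite | github.com/ivanillera/TP1Sintaxis | Lexer.py | a_slash
-- ===== SOURCE A (Python) =====
-- TRAMPA = -1
--
-- RESULTADO_ACEPTADO = "ACEPTADO"
--
-- RESULTADO_TRAMPA = "TRAMPA"
--
-- RESULTADO_NO_ACEPTADO = "NO_ACEPTADO"
--
-- def d_slash(estado_anterior, caracter):
-- 	if estado_anterior == 0 and caracter == "/":
-- 		return 1
-- 	return RESULTADO_TRAMPA
--
-- def a_slash(cadena):
-- 	Finales = [1]
-- 	estado_actual = 0
--
-- 	for caracter in cadena:
-- 		estado_proximo = d_slash(estado_actual, caracter)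
-- 		if estado_proximo == TRAMPA:
-- 			return RESULTADO_TRAMPA
-- 		estado_actual = estado_proximo
--
-- 	if estado_actual in Finales:
-- 		return RESULTADO_ACEPTADO
-- 	else:
-- 		return RESULTADO_NO_ACEPTADO
-- ===== SOURCE B (Python) =====
-- RESULTADO_ACEPTADO = "ACEPTADO"
-- RESULTADO_NO_ACEPTADO = "NO_ACEPTADO"
--
-- def a_slash(cadena):
--     chars = list(cadena)
--     return RESULTADO_ACEPTADO if len(chars) == 1 and chars[0] == "/" else RESULTADO_NO_ACEPTADO
-- ===== Notes on version B (the rewrite author's own statement) =====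
-- stated objective: simpler
-- what changed: Replaces the DFA transition loop and d_slash helper by a single closed-form check that the input has exactly one element equal to '/' (the loop's trap branch never fires in A, so the two agree everywhere).
import Mathlib
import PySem

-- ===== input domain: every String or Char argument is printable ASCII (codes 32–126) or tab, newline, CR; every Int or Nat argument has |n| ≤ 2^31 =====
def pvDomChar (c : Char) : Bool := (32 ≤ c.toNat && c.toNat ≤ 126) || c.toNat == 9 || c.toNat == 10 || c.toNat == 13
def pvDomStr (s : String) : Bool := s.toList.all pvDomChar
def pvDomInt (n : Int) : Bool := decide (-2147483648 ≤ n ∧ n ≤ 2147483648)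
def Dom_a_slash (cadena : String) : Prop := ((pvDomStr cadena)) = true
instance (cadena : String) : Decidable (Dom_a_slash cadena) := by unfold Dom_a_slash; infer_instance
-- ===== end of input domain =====

-- B replaces A's DFA loop by a closed-form one-element check; same return value on every string (simpler).


-- ===== PORT A =====
-- In Python the state variable holds either an int (0 or 1) or the string "TRAMPA"
-- (d_slash returns RESULTADO_TRAMPA, not TRAMPA); this sum-like type models that exactly.
inductive PyState where
  | i : Int → PyState
  | s : String → PyState
deriving DecidableEq, Repr

def d_slash (estado_anterior : PyState) (caracter : Char) : PyState :=
  if estado_anterior = PyState.i 0 ∧ caracter = '/' then PyState.i 1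
  else PyState.s "TRAMPA"

-- the `for` loop with its early return; `estado_proximo == TRAMPA` is the Python int comparison,
-- false whenever estado_proximo is a string (exact to Python's cross-type ==)
def a_slash_loop (cs : List Char) (estado_actual : PyState) : String :=
  match cs with
  | [] => if estado_actual = PyState.i 1 then "ACEPTADO" else "NO_ACEPTADO"
  | c :: rest =>
    let estado_proximo := d_slash estado_actual c
    if estado_proximo = PyState.i (-1) then "TRAMPA"
    else a_slash_loop rest estado_proximo

def a_slash (cadena : String) : String :=
  a_slash_loop cadena.toList (PyState.i 0)

-- ===== PORT B =====
def a_slash_alt (cadena : String) : String :=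
  let chars := cadena.toList
  if chars.length = 1 ∧ PySem.List.pyGet? chars 0 = some '/' then "ACEPTADO"
  else "NO_ACEPTADO"

-- ===== PRECONDITION & SPEC =====
def Spec_a_slash (cadena : String) (out : String) : Prop := out = a_slash_alt cadena
instance (cadena : String) (out : String) : Decidable (Spec_a_slash cadena out) := by unfold Spec_a_slash; infer_instance

-- ===== CLAIM (what is proved, stated in full; the proofs are below) =====
def Claim_equal_a_slash : Prop := ∀ (cadena : String), Dom_a_slash cadena → Spec_a_slash cadena (a_slash cadena)

-- ===== LEMMAS AND PROOFS =====

-- once the state is a string it stays "TRAMPA" and is never final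
theorem a_slash_loop_s (cs : List Char) (v : String) :
    a_slash_loop cs (PyState.s v) = "NO_ACEPTADO" := by
  induction cs generalizing v with
  | nil => simp [a_slash_loop]
  | cons c rest ih =>
      simp [a_slash_loop, d_slash]
      exact ih _

theorem a_slash_eq_alt (cs : List Char) :
    a_slash_loop cs (PyState.i 0) =
      (if cs.length = 1 ∧ PySem.List.pyGet? cs 0 = some '/' then "ACEPTADO" else "NO_ACEPTADO") := by
  match cs with
  | [] => simp [a_slash_loop]
  | c :: rest =>
    have hg : PySem.List.pyGet? (c :: rest) 0 = some c := by
      simp [PySem.List.pyGet?, PySem.List.pyIdx?]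
    by_cases hc : c = '/'
    · subst hc
      match rest with
      | [] => simp [a_slash_loop, d_slash, hg]
      | c2 :: rest2 =>
        simp [a_slash_loop, d_slash, a_slash_loop_s]
    · simp [a_slash_loop, d_slash, hc, a_slash_loop_s, hg]

-- ===== VERDICT (by name: the statement is the Claim_ definition above) =====
theorem a_slash_spec : Claim_equal_a_slash := by
  intro cadena _
  unfold Spec_a_slash a_slash
  rw [a_slash_eq_alt cadena.toList]
  rfl
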